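-- pv_equiv track=rewrite | github.com/Steveineiter/Bachelor_Thesis | Learning from Data/checklist/checklistCreator.py | user_to_liked_posts_count_and_url
-- ===== SOURCE A (Python) =====
-- def user_to_liked_posts_count_and_url(url_of_post_to_post_was_liked_by):
--     # Put names in dict and count it (Person: (counter, id_of_post))
--     user_to_liked_posts_count_and_url = {}
--
--     for url_of_post, post_was_liked_by in url_of_post_to_post_was_liked_by.items():
--         users = [str(user) for user in post_was_liked_by.split(" ")]
--         for user in users:
--             if user in user_to_liked_posts_count_and_url:
--                 user_to_liked_posts_count_and_url[user] = (
--                     user_to_liked_posts_count_and_url[user][0] + 1,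
--                     user_to_liked_posts_count_and_url[user][1] + " " + url_of_post,
--                 )
--             else:
--                 user_to_liked_posts_count_and_url[user] = (1, url_of_post)
--
--     return user_to_liked_posts_count_and_url
-- ===== SOURCE B (Python) =====
-- def user_to_liked_posts_count_and_url(url_of_post_to_post_was_liked_by):
--     # Group first: user -> list of post urls (one entry per occurrence), then
--     # summarize in a second pass as (len(urls), ' '.join(urls)).
--     urls_by_user = {}
--     for url_of_post, post_was_liked_by in url_of_post_to_post_was_liked_by.items():
--         for user in post_was_liked_by.split(" "):
--             urls_by_user.setdefault(str(user), []).append(url_of_post)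
--     return {user: (len(urls), " ".join(urls)) for user, urls in urls_by_user.items()}
-- ===== Notes on version B (the rewrite author's own statement) =====
-- stated objective: simpler
-- what changed: B accumulates per user a list of post URLs in one grouping pass and derives (count, joined string) in a separate summarizing pass, instead of maintaining a running (counter, concatenated-string) tuple inside the loop.
import Mathlib
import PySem

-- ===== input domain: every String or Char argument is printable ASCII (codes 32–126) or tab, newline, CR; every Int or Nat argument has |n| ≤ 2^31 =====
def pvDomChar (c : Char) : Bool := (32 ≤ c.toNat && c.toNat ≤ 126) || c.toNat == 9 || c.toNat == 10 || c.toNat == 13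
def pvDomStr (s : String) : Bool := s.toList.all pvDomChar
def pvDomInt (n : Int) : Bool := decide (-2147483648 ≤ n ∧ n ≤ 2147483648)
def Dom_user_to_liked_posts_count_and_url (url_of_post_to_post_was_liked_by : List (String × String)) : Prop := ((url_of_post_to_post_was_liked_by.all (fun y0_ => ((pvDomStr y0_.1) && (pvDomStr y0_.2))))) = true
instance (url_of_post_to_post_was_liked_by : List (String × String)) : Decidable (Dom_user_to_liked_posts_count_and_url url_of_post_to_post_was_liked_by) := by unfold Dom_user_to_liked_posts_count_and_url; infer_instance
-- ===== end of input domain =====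

-- B replaces A's running (counter, concatenated-string) dict value with a grouping pass
-- (user -> list of urls) plus a separate summarizing pass; objective: simpler.

-- ===== PORT A =====
def user_to_liked_posts_count_and_url (url_of_post_to_post_was_liked_by : List (String × String)) : List (String × Int × String) :=
  (url_of_post_to_post_was_liked_by.foldl
    (fun d p =>
      -- users = [str(user) for user in post_was_liked_by.split(" ")]; str is identity on str
      ((PySem.Str.split? p.2 " ").getD []).foldl
        (fun d user =>
          match d.get? user with
          | some v => d.insert user (v.1 + 1, v.2 ++ " " ++ p.1)
          | none   => d.insert user ((1 : Int), p.1)) d)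
    PySem.Dict.empty).items

-- ===== PORT B =====
def pvSummarize (urls : List String) : Int × String :=
  ((urls.length : Int), PySem.Str.join " " urls)

def user_to_liked_posts_count_and_url_alt (url_of_post_to_post_was_liked_by : List (String × String)) : List (String × Int × String) :=
  let urls_by_user :=
    url_of_post_to_post_was_liked_by.foldl
      (fun d p =>
        ((PySem.Str.split? p.2 " ").getD []).foldl
          (fun d user => d.modify user [] (fun urls => urls ++ [p.1])) d)
      PySem.Dict.empty
  urls_by_user.items.map (fun q => (q.1, pvSummarize q.2))

-- ===== PRECONDITION & SPEC =====
def Spec_user_to_liked_posts_count_and_url (url_of_post_to_post_was_liked_by : List (String × String)) (out : List (String × Int × String)) : Prop := out = user_to_liked_posts_count_and_url_alt url_of_post_to_post_was_liked_by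
instance (url_of_post_to_post_was_liked_by : List (String × String)) (out : List (String × Int × String)) : Decidable (Spec_user_to_liked_posts_count_and_url url_of_post_to_post_was_liked_by out) := by unfold Spec_user_to_liked_posts_count_and_url; infer_instance

-- ===== CLAIM (what is proved, stated in full; the proofs are below) =====
def Claim_equal_user_to_liked_posts_count_and_url : Prop := ∀ (url_of_post_to_post_was_liked_by : List (String × String)), Dom_user_to_liked_posts_count_and_url url_of_post_to_post_was_liked_by → Spec_user_to_liked_posts_count_and_url url_of_post_to_post_was_liked_by (user_to_liked_posts_count_and_url url_of_post_to_post_was_liked_by)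

-- ===== LEMMAS AND PROOFS =====

-- joining one more piece onto a nonempty list of pieces appends " " ++ piece
theorem pvCharsJoin_append_singleton (sep : List Char) (as : List (List Char)) (b : List Char)
    (h : as ≠ []) :
    PySem.Chars.join sep (as ++ [b]) = PySem.Chars.join sep as ++ sep ++ b := by
  induction as with
  | nil => exact absurd rfl h
  | cons a as ih =>
    cases as with
    | nil => simp [PySem.Chars.join_cons_cons, PySem.Chars.join_singleton]
    | cons a2 as' =>
      have := ih (by simp)
      simp only [List.cons_append] at this
      simp only [List.cons_append, PySem.Chars.join_cons_cons, this, List.append_assoc]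

theorem pvJoin_append_singleton (urls : List String) (u : String) (h : urls ≠ []) :
    PySem.Str.join " " (urls ++ [u]) = PySem.Str.join " " urls ++ " " ++ u := by
  apply String.toList_inj.mp
  simp only [PySem.Str.toList_join, List.map_append, List.map_cons, List.map_nil,
    String.toList_append]
  rw [pvCharsJoin_append_singleton _ _ _ (by simpa using h)]

-- the invariant: A's dict is B's dict with each value list summarized, and all lists nonempty
def pvInv (aD : PySem.Dict String (Int × String)) (bD : PySem.Dict String (List String)) : Prop :=
  aD.items = bD.items.map (fun q => (q.1, pvSummarize q.2)) ∧ ∀ q ∈ bD.items, q.2 ≠ []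

theorem pvGet_of_inv (aD : PySem.Dict String (Int × String)) (bD : PySem.Dict String (List String))
    (h : pvInv aD bD) (user : String) :
    aD.get? user = (bD.get? user).map pvSummarize := by
  rcases h with ⟨hitems, -⟩
  simp only [PySem.Dict.get?, hitems, List.find?_map]
  rw [show ((fun p : String × (Int × String) => p.1 == user) ∘
      (fun q : String × List String => (q.1, pvSummarize q.2))) =
      (fun q : String × List String => q.1 == user) from rfl]
  cases List.find? (fun q : String × List String => q.1 == user) bD.items <;> rfl

theorem pvStep (aD : PySem.Dict String (Int × String)) (bD : PySem.Dict String (List String))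
    (h : pvInv aD bD) (user url : String) :
    pvInv (match aD.get? user with
           | some v => aD.insert user (v.1 + 1, v.2 ++ " " ++ url)
           | none   => aD.insert user ((1 : Int), url))
          (bD.modify user [] (fun urls => urls ++ [url])) := by
  have hget := pvGet_of_inv aD bD h user
  obtain ⟨hitems, hne⟩ := h
  simp only [PySem.Dict.modify]
  refine ⟨?_, ?_⟩
  · cases hb : bD.get? user with
    | none =>
      have ha : aD.get? user = none := by rw [hget, hb]; rfl
      have hca : aD.contains user = false := by
        rw [PySem.Dict.contains_eq_isSome_get?, ha]; rfl
      have hcb : bD.contains user = false := by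
        rw [PySem.Dict.contains_eq_isSome_get?, hb]; rfl
      have hgd : bD.getD user [] = [] := PySem.Dict.getD_of_get?_eq_none bD [] hb
      simp only [ha]
      rw [PySem.Dict.items_insert_of_not_contains _ _ hca,
        PySem.Dict.items_insert_of_not_contains _ _ hcb, hitems, hgd]
      simp [pvSummarize, PySem.Str.join, PySem.Chars.join_singleton]
    | some urls =>
      have hmem : (user, urls) ∈ bD.items := PySem.Dict.mem_items_of_get?_eq_some bD hb
      have hurls : urls ≠ [] := hne _ hmem
      have ha : aD.get? user = some (pvSummarize urls) := by rw [hget, hb]; rfl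
      have hca : aD.contains user = true := by
        rw [PySem.Dict.contains_eq_isSome_get?, ha]; rfl
      have hcb : bD.contains user = true := by
        rw [PySem.Dict.contains_eq_isSome_get?, hb]; rfl
      have hgd : bD.getD user [] = urls := PySem.Dict.getD_of_get?_eq_some bD [] hb
      simp only [ha]
      rw [PySem.Dict.items_insert_of_contains _ _ hca,
        PySem.Dict.items_insert_of_contains _ _ hcb, hitems, hgd,
        List.map_map, List.map_map]
      refine List.map_congr_left (fun q hq => ?_)
      by_cases hk : q.1 = user
      · simp only [Function.comp, hk, beq_self_eq_true, if_true]
        have : pvSummarize (urls ++ [url]) =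
            ((pvSummarize urls).1 + 1, (pvSummarize urls).2 ++ " " ++ url) := by
          simp [pvSummarize, pvJoin_append_singleton urls url hurls]
        simp [this]
      · simp [Function.comp, hk]
  · intro q hq
    rw [PySem.Dict.mem_items_insert] at hq
    rcases hq with rfl | ⟨hq, -⟩
    · simp
    · exact hne _ hq

theorem pvInner (ts : List String) (url : String)
    (aD : PySem.Dict String (Int × String)) (bD : PySem.Dict String (List String))
    (h : pvInv aD bD) :
    pvInv (ts.foldl (fun d user =>
            match d.get? user with
            | some v => d.insert user (v.1 + 1, v.2 ++ " " ++ url)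
            | none   => d.insert user ((1 : Int), url)) aD)
          (ts.foldl (fun d user => d.modify user [] (fun urls => urls ++ [url])) bD) := by
  induction ts generalizing aD bD with
  | nil => exact h
  | cons t ts ih => exact ih _ _ (pvStep aD bD h t url)

theorem pvOuter (l : List (String × String))
    (aD : PySem.Dict String (Int × String)) (bD : PySem.Dict String (List String))
    (h : pvInv aD bD) :
    pvInv (l.foldl (fun d p =>
            ((PySem.Str.split? p.2 " ").getD []).foldl
              (fun d user =>
                match d.get? user with
                | some v => d.insert user (v.1 + 1, v.2 ++ " " ++ p.1)
                | none   => d.insert user ((1 : Int), p.1)) d) aD)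
          (l.foldl (fun d p =>
            ((PySem.Str.split? p.2 " ").getD []).foldl
              (fun d user => d.modify user [] (fun urls => urls ++ [p.1])) d) bD) := by
  induction l generalizing aD bD with
  | nil => exact h
  | cons p l ih => exact ih _ _ (pvInner _ _ _ _ h)

-- ===== VERDICT (by name: the statement is the Claim_ definition above) =====
theorem user_to_liked_posts_count_and_url_spec : Claim_equal_user_to_liked_posts_count_and_url := by
  intro l _
  show _ = _
  have h := pvOuter l PySem.Dict.empty PySem.Dict.empty ⟨rfl, by simp [PySem.Dict.empty]⟩
  simpa [user_to_liked_posts_count_and_url, user_to_liked_posts_count_and_url_alt] using h.1
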